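-- pv_equiv track=rewrite | github.com/sotsoguk/elementsOfPI | ch12-hash/python/12_02_letter.py | constructable
-- ===== SOURCE A (Python) =====
-- from collections import Counter
--
-- def constructable(l:str, m:str) -> bool:
--     chars_letter = Counter(l)
--
--     for c in m:
--         if c in chars_letter:
--             chars_letter[c] -= 1
--             if chars_letter[c] == 0:
--                 del chars_letter[c]
--                 # check if all letters are used
--                 if not chars_letter:
--                     return True
--     return not chars_letter
-- ===== SOURCE B (Python) =====
-- def constructable(l: str, m: str) -> bool:
--     # sort-and-merge: sorted(l) must be a subsequence of sorted(m);
--     # a greedy one-way iterator scan checks that.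
--     it = iter(sorted(m))
--     return all(c in it for c in sorted(l))
-- ===== Notes on version B (the rewrite author's own statement) =====
-- stated objective: alternative
-- what changed: Replaces A's decrementing-Counter scan of m (with early-exit branches) by a sort-and-merge algorithm: sort both strings and greedily check that sorted(l) is a subsequence of sorted(m); correct because multiset containment of characters is equivalent to the sorted lists being in the subsequence relation.
import Mathlib
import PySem

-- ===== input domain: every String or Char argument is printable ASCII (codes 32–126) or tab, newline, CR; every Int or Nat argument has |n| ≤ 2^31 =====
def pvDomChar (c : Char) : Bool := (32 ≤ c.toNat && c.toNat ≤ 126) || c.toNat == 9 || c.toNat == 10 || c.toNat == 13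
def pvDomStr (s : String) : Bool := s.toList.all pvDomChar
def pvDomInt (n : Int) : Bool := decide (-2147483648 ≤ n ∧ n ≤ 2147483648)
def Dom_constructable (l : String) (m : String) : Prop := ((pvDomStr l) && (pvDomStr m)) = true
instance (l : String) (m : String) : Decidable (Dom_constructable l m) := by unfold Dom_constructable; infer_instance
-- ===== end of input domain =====

-- B replaces A's counter-decrementing scan of m by sorting both strings and checking
-- with a greedy merge scan that sorted(l) is a subsequence of sorted(m); objective: alternative.

-- ===== PORT A =====
-- the for-loop over m, with the two early `return True`/fallthrough paths of A
def pvLoopA : PySem.Dict Char Int → List Char → Bool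
  | d, [] => decide (d.items = [])
  | d, c :: rest =>
    if d.contains c then
      let d1 := d.modify c 0 (· - 1)
      if d1.getD c 0 = 0 then
        let d2 := d1.erase c
        if d2.items = [] then true else pvLoopA d2 rest
      else pvLoopA d1 rest
    else pvLoopA d rest

def constructable (l : String) (m : String) : Bool :=
  pvLoopA (PySem.Dict.counter l.toList) m.toList

-- ===== PORT B =====
-- the `all(c in it for c in sorted(l))` greedy scan: `c in it` consumes the sorted(m)
-- iterator up to and including the first occurrence of c, failing if it runs out
def pvConsume : List Char → List Char → Bool
  | [], _ => true
  | _ :: _, [] => false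
  | c :: need, x :: have_ =>
    if c = x then pvConsume need have_ else pvConsume (c :: need) have_

def constructable_alt (l : String) (m : String) : Bool :=
  pvConsume (PySem.List.sorted l.toList (fun x => x) false)
            (PySem.List.sorted m.toList (fun x => x) false)

-- ===== PRECONDITION & SPEC =====
def Spec_constructable (l : String) (m : String) (out : Bool) : Prop := out = constructable_alt l m
instance (l : String) (m : String) (out : Bool) : Decidable (Spec_constructable l m out) := by unfold Spec_constructable; infer_instance

-- ===== CLAIM (what is proved, stated in full; the proofs are below) =====
def Claim_equal_constructable : Prop := ∀ (l : String) (m : String), Dom_constructable l m → Spec_constructable l m (constructable l m)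

-- ===== LEMMAS AND PROOFS =====

theorem pv_keys_erase (d : PySem.Dict Char Int) (c : Char) :
    (d.erase c).keys = d.keys.filter (fun k => !(k == c)) := by
  obtain ⟨its⟩ := d
  induction its with
  | nil => rfl
  | cons p t ih =>
    simp only [PySem.Dict.erase, PySem.Dict.keys] at *
    by_cases h : p.1 = c <;> simp [h, ih]

theorem pv_get?_erase_ne (d : PySem.Dict Char Int) (c k : Char) (h : k ≠ c) :
    (d.erase c).get? k = d.get? k := by
  obtain ⟨its⟩ := d
  induction its with
  | nil => rfl
  | cons p t ih =>
    simp only [PySem.Dict.erase, PySem.Dict.get?] at *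
    by_cases h1 : p.1 = c
    · have hpk : (p.1 == k) = false := by
        simp only [beq_eq_false_iff_ne]; intro hk; exact h (hk ▸ h1)
      rw [List.filter_cons_of_neg (by simp [h1]), List.find?_cons_of_neg (by simp [hpk])]
      exact ih
    · rw [List.filter_cons_of_pos (by simp [h1])]
      by_cases h2 : p.1 = k
      · rw [List.find?_cons_of_pos (by simp [h2]), List.find?_cons_of_pos (by simp [h2])]
      · rw [List.find?_cons_of_neg (by simp [h2]), List.find?_cons_of_neg (by simp [h2])]
        exact ih

theorem pv_items_nil_iff_keys_nil (d : PySem.Dict Char Int) :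
    d.items = [] ↔ d.keys = [] := by
  obtain ⟨its⟩ := d
  cases its <;> simp [PySem.Dict.keys]

-- characterisation of A's loop: it succeeds iff every residual demand is met by the rest of m
theorem pvLoopA_iff (rest : List Char) : ∀ (d : PySem.Dict Char Int),
    d.keys.Nodup → (∀ k ∈ d.keys, 0 < d.getD k 0) →
    (pvLoopA d rest = true ↔ ∀ k ∈ d.keys, d.getD k 0 ≤ (rest.count k : Int)) := by
  induction rest with
  | nil =>
    intro d hnd hpos
    simp only [pvLoopA, decide_eq_true_eq, pv_items_nil_iff_keys_nil]
    constructor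
    · intro h; rw [h]; simp
    · intro h
      cases hk : d.keys with
      | nil => rfl
      | cons a t =>
        exfalso
        have h1 := hpos a (by rw [hk]; simp)
        have h2 := h a (by rw [hk]; simp)
        simp at h2; omega
  | cons c rest ih =>
    intro d hnd hpos
    by_cases hc : d.contains c = true
    · have hcm : c ∈ d.keys := (PySem.Dict.contains_iff_mem_keys d c).1 hc
      have hkeys1 : (d.modify c 0 (· - 1)).keys = d.keys := by
        rw [PySem.Dict.keys_modify]
        exact PySem.Dict.keys_insert_of_contains d _ hc
      have hgd1 : ∀ k, (d.modify c 0 (· - 1)).getD k 0 =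
          if k = c then d.getD c 0 - 1 else d.getD k 0 := fun k => by
        simp [PySem.Dict.getD_modify]
      by_cases hz : (d.modify c 0 (· - 1)).getD c 0 = 0
      · -- the decremented entry hit zero: erase it
        have hz' : d.getD c 0 - 1 = 0 := by
          have h0 := hz; rw [hgd1 c, if_pos rfl] at h0; exact h0
        have hdc1 : d.getD c 0 = 1 := by omega
        set d2 := (d.modify c 0 (· - 1)).erase c with hd2
        have hk2 : d2.keys = d.keys.filter (fun k => !(k == c)) := by
          rw [hd2, pv_keys_erase, hkeys1]
        have hg2 : ∀ k, k ≠ c → d2.getD k 0 = d.getD k 0 := by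
          intro k hkc
          rw [hd2, PySem.Dict.getD, pv_get?_erase_ne _ _ _ hkc, ← PySem.Dict.getD]
          have := hgd1 k; simp [hkc] at this; exact this
        have hnd2 : d2.keys.Nodup := by rw [hk2]; exact hnd.filter _
        have hmem2 : ∀ k, k ∈ d2.keys ↔ k ∈ d.keys ∧ k ≠ c := by
          intro k; rw [hk2]; simp
        have hpos2 : ∀ k ∈ d2.keys, 0 < d2.getD k 0 := by
          intro k hk
          obtain ⟨hk1, hk2'⟩ := (hmem2 k).1 hk
          rw [hg2 k hk2']; exact hpos k hk1
        have hrhs : (∀ k ∈ d2.keys, d2.getD k 0 ≤ (rest.count k : Int)) ↔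
            (∀ k ∈ d.keys, d.getD k 0 ≤ ((c :: rest).count k : Int)) := by
          constructor
          · intro h k hk
            by_cases hkc : k = c
            · subst hkc
              simp [hdc1]
            · have := h k ((hmem2 k).2 ⟨hk, hkc⟩)
              rw [hg2 k hkc] at this
              have hcnt : (c :: rest).count k = rest.count k := by
                simp [Ne.symm hkc]
              rw [hcnt]; exact this
          · intro h k hk
            obtain ⟨hk1, hkc⟩ := (hmem2 k).1 hk
            have := h k hk1
            have hcnt : (c :: rest).count k = rest.count k := by
              simp [Ne.symm hkc]
            rw [hcnt] at this
            rw [hg2 k hkc]; exact this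
        by_cases he : d2.items = []
        · -- early `return True`; the whole demand was just {c ↦ 1}
          have : pvLoopA d (c :: rest) = true := by
            simp [pvLoopA, hc, hz, ← hd2, he]
          rw [this]
          simp only [true_iff]
          intro k hk
          by_cases hkc : k = c
          · subst hkc; simp [hdc1]
          · exfalso
            have : k ∈ d2.keys := (hmem2 k).2 ⟨hk, hkc⟩
            rw [(pv_items_nil_iff_keys_nil d2).1 he] at this
            simp at this
        · have hstep : pvLoopA d (c :: rest) = pvLoopA d2 rest := by
            simp [pvLoopA, hc, hz, ← hd2]
            intro h0; exact absurd h0 he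
          rw [hstep, ih d2 hnd2 hpos2, hrhs]
      · -- decremented entry still positive
        set d1 := d.modify c 0 (· - 1) with hd1
        have hpos1 : ∀ k ∈ d1.keys, 0 < d1.getD k 0 := by
          intro k hk
          rw [hd1] at hk ⊢; rw [hkeys1] at hk
          rw [hgd1 k]
          by_cases hkc : k = c
          · rw [if_pos hkc]
            have h1 := hpos c hcm
            have h2 : d.getD c 0 - 1 ≠ 0 := by
              intro h0; apply hz
              rw [hd1, hgd1 c, if_pos rfl]; exact h0
            omega
          · rw [if_neg hkc]; exact hpos k hk
        have hnd1 : d1.keys.Nodup := by rw [hd1, hkeys1]; exact hnd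
        have hstep : pvLoopA d (c :: rest) = pvLoopA d1 rest := by
          simp [pvLoopA, hc, ← hd1, hz]
        rw [hstep, ih d1 hnd1 hpos1]
        constructor
        · intro h k hk
          have hk1 : k ∈ d1.keys := by rw [hd1, hkeys1]; exact hk
          have := h k hk1
          rw [hd1, hgd1 k] at this
          by_cases hkc : k = c
          · subst hkc; simp at this; simp only [List.count_cons, beq_self_eq_true, if_true]; push_cast; omega
          · simp [hkc] at this
            have hcnt : (c :: rest).count k = rest.count k := by
              simp [Ne.symm hkc]
            rw [hcnt]; exact this
        · intro h k hk
          rw [hd1, hkeys1] at hk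
          have := h k hk
          rw [hd1, hgd1 k]
          by_cases hkc : k = c
          · subst hkc; simp only [List.count_cons, beq_self_eq_true, if_true] at this ⊢; push_cast at this ⊢; omega
          · simp [hkc]
            have hcnt : (c :: rest).count k = rest.count k := by
              simp [Ne.symm hkc]
            rw [hcnt] at this; exact this
    · have hstep : pvLoopA d (c :: rest) = pvLoopA d rest := by
        simp only [pvLoopA, hc, if_false, Bool.false_eq_true]
      have hcnm : c ∉ d.keys := fun hmem =>
        hc ((PySem.Dict.contains_iff_mem_keys d c).2 hmem)
      rw [hstep, ih d hnd hpos]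
      constructor <;> intro h k hk <;> have hkc : k ≠ c := fun he => hcnm (he ▸ hk)
      · have hcnt : (c :: rest).count k = rest.count k := by
          simp [Ne.symm hkc]
        rw [hcnt]; exact h k hk
      · have := h k hk
        have hcnt : (c :: rest).count k = rest.count k := by
          simp [Ne.symm hkc]
        rw [hcnt] at this; exact this

theorem pvA_iff (l m : String) :
    constructable l m = true ↔
      ∀ k, l.toList.count k ≤ m.toList.count k := by
  unfold constructable
  rw [pvLoopA_iff m.toList (PySem.Dict.counter l.toList)
      (PySem.Dict.nodup_keys_counter l.toList)
      (by
        intro k hk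
        rw [PySem.Dict.getD_counter]
        rw [PySem.Dict.keys_counter] at hk
        have : k ∈ l.toList := (PySem.Set.mem_ofList _ _).1 hk
        exact_mod_cast List.count_pos_iff.2 this)]
  constructor <;> intro h k
  · by_cases hk : k ∈ l.toList
    · have : k ∈ (PySem.Dict.counter l.toList).keys := by
        rw [PySem.Dict.keys_counter]; exact (PySem.Set.mem_ofList _ _).2 hk
      have := h k this
      rw [PySem.Dict.getD_counter] at this
      exact_mod_cast this
    · simp [List.count_eq_zero_of_not_mem hk]
  · intro hk
    rw [PySem.Dict.getD_counter]
    exact_mod_cast h k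

-- the greedy scan decides the Sublist relation
theorem pvConsume_iff : ∀ (t s : List Char), pvConsume s t = true ↔ List.Sublist s t := by
  intro t
  induction t with
  | nil =>
    intro s; cases s <;> simp [pvConsume]
  | cons x hv ih =>
    intro s
    cases s with
    | nil => simp [pvConsume]
    | cons c need =>
      by_cases hcx : c = x
      · subst hcx
        rw [pvConsume, if_pos rfl, ih]
        constructor
        · intro h; exact h.cons₂ c
        · intro h
          exact List.cons_sublist_cons.1 h
      · rw [pvConsume, if_neg hcx, ih]
        constructor
        · intro h; exact h.cons x
        · intro h
          rcases List.sublist_cons_iff.1 h with h' | ⟨s', hs', h''⟩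
          · exact h'
          · exact absurd (List.cons.injEq .. ▸ hs' |>.1) hcx

theorem pvB_iff (l m : String) :
    constructable_alt l m = true ↔
      ∀ k, l.toList.count k ≤ m.toList.count k := by
  unfold constructable_alt
  rw [pvConsume_iff]
  have hpl := PySem.List.sorted_pairwise l.toList (fun x => x) (κ := Char)
  have hpm := PySem.List.sorted_pairwise m.toList (fun x => x) (κ := Char)
  have hperml := PySem.List.sorted_perm l.toList (fun x => x) false
  have hpermm := PySem.List.sorted_perm m.toList (fun x => x) false
  constructor
  · intro h k
    have hsub : List.Subperm (PySem.List.sorted l.toList (fun x => x) false)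
        (PySem.List.sorted m.toList (fun x => x) false) := h.subperm
    have := (List.subperm_iff_count.1 hsub) k
    rwa [hperml.count_eq, hpermm.count_eq] at this
  · intro h
    apply List.sublist_of_subperm_of_pairwise (r := fun a b : Char => a ≤ b) _ hpl hpm
    apply List.subperm_iff_count.2
    intro k
    rw [hperml.count_eq, hpermm.count_eq]
    exact h k

-- ===== VERDICT (by name: the statement is the Claim_ definition above) =====
theorem constructable_spec : Claim_equal_constructable := by
  intro l m _
  unfold Spec_constructable
  rw [Bool.eq_iff_iff, pvA_iff, pvB_iff]
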